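-- pv_equiv track=rewrite | github.com/cheesejaguar/sopher.ai | backend/app/services/style_learning.py | get_common_starters
-- ===== SOURCE A (Python) =====
-- from collections import Counter
--
-- def get_common_starters(sentences: list[str], top_n: int = 10) -> list[str]:
--     """Get most common sentence starters (first 1-2 words)."""
--     starters = []
--     for sentence in sentences:
--         words = sentence.split()
--         if len(words) >= 2:
--             starters.append(f"{words[0]} {words[1]}".lower())
--         elif words:
--             starters.append(words[0].lower())
--
--     counter = Counter(starters)
--     return [starter for starter, _ in counter.most_common(top_n)]
-- ===== SOURCE B (Python) =====
-- def get_common_starters(sentences: list[str], top_n: int = 10) -> list[str]: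
--     """Get most common sentence starters (first 1-2 words)."""
--     counts = {}
--     for sentence in sentences:
--         words = sentence.split()
--         if words:
--             key = " ".join(words[:2]).lower()
--             counts[key] = counts.get(key, 0) + 1
--     result = []
--     remaining = list(counts)
--     while remaining and len(result) < top_n:
--         best = max(remaining, key=lambda k: counts[k])
--         result.append(best)
--         remaining.remove(best)
--     return result
-- ===== Notes on version B (the rewrite author's own statement) =====
-- stated objective: alternative
-- what changed: B never sorts and never calls most_common: after one counting pass it keeps the distinct keys in first-occurrence order and runs a selection loop that repeatedly extracts the first key of maximal count (Python max's first-maximum tie-break reproduces most_common's stable order) until top_n picks are made or the pool is empty.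
import Mathlib
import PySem

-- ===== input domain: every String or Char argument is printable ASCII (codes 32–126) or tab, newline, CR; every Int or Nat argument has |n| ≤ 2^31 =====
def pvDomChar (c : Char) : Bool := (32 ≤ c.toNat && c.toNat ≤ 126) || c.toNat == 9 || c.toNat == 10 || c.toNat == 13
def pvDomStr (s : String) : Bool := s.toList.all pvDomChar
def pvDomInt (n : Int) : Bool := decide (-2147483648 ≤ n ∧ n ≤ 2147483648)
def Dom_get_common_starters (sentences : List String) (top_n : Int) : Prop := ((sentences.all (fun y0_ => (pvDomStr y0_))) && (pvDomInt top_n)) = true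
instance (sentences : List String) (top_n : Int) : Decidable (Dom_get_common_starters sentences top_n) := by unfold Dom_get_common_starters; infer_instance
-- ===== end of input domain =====

-- B replaces A's Counter + most_common heap selection by a sort-free selection loop:
-- count the starter keys once, keep the distinct keys in first-occurrence order, then
-- repeatedly extract the first key of maximal count until top_n picks are made; objective: alternative.

-- ===== PORT A =====
def get_common_starters (sentences : List String) (top_n : Int) : List String :=
  let starters := sentences.foldl (fun acc sentence =>
    let words := PySem.Str.split₀ sentence
    if 2 ≤ words.length then
      acc ++ [PySem.Str.lower (words[0]! ++ " " ++ words[1]!)]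
    else if words ≠ [] then
      acc ++ [PySem.Str.lower words[0]!]
    else acc) []
  let counter := PySem.Dict.counter starters
  -- counter.most_common(top_n) = heapq.nlargest(top_n, items, key=count): [] for top_n < 0,
  -- else the first top_n items of the stable descending sort by count
  let mc := if top_n < 0 then []
            else (PySem.List.sorted counter.items (fun kv => kv.2) true).take top_n.toNat
  mc.map (fun kv => kv.1)

-- ===== PORT B =====
-- max(remaining, key=...) for nonempty remaining is a member of it (needed by the loop's termination)
theorem pvMax?_cons_isSome {α κ : Type} [LinearOrder κ] (key : α → κ) (x : α) (xs : List α) :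
    ∃ m, PySem.List.max? (x :: xs) key = some m := by
  suffices h : ∀ (l : List α) (a : α),
      ∃ m, l.foldl (fun acc y => match acc with
        | none => some y
        | some b => if key b < key y then some y else some b) (some a) = some m by
    simpa [PySem.List.max?] using h xs x
  intro l
  induction l with
  | nil => intro a; exact ⟨a, rfl⟩
  | cons y t ih =>
      intro a
      simp only [List.foldl_cons]
      by_cases h : key a < key y <;> simp [h, ih]

theorem pvMaxD_cons_mem {α κ : Type} [LinearOrder κ] (key : α → κ) (x : α) (xs : List α) :
    PySem.List.maxD (x :: xs) key x ∈ x :: xs := by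
  obtain ⟨m, hm⟩ := pvMax?_cons_isSome key x xs
  rw [PySem.List.maxD, hm]
  exact PySem.List.max?_mem hm

-- the while-loop: budget = top_n - len(result); remaining.remove(best) is List.erase
-- (exact: best ∈ remaining, and both drop the first occurrence)
def pvPickLoop (c : String → Int) (budget : Int) : List String → List String
  | [] => []
  | x :: xs =>
    if budget ≤ 0 then []
    else
      let best := PySem.List.maxD (x :: xs) c x
      best :: pvPickLoop c (budget - 1) ((x :: xs).erase best)
termination_by r => r.length
decreasing_by
  simp [List.length_erase_of_mem (pvMaxD_cons_mem c x xs)]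

def get_common_starters_alt (sentences : List String) (top_n : Int) : List String :=
  let counts := sentences.foldl (fun d sentence =>
    let words := PySem.Str.split₀ sentence
    if words ≠ [] then
      let key := PySem.Str.lower (PySem.Str.join " " (PySem.List.slice words none (some 2)))
      d.insert key (d.getD key 0 + 1)
    else d) (PySem.Dict.empty : PySem.Dict String Int)
  let remaining := counts.keys
  -- counts[k] is exact as getD: the loop only looks up keys of counts
  pvPickLoop (fun k => counts.getD k 0) top_n remaining

-- ===== PRECONDITION & SPEC =====
def Spec_get_common_starters (sentences : List String) (top_n : Int) (out : List String) : Prop := out = get_common_starters_alt sentences top_n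
instance (sentences : List String) (top_n : Int) (out : List String) : Decidable (Spec_get_common_starters sentences top_n out) := by unfold Spec_get_common_starters; infer_instance

-- ===== CLAIM (what is proved, stated in full; the proofs are below) =====
def Claim_equal_get_common_starters : Prop := ∀ (sentences : List String) (top_n : Int), Dom_get_common_starters sentences top_n → Spec_get_common_starters sentences top_n (get_common_starters sentences top_n)

-- ===== LEMMAS AND PROOFS =====

-- the per-sentence starter key (none = sentence has no words)
def pvKey (sentence : String) : Option String :=
  let words := PySem.Str.split₀ sentence
  if 2 ≤ words.length then some (PySem.Str.lower (words[0]! ++ " " ++ words[1]!))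
  else if words ≠ [] then some (PySem.Str.lower words[0]!)
  else none

-- selection loop without a budget (picks every distinct key)
def pvSelAll (c : String → Int) : List String → List String
  | [] => []
  | x :: xs =>
    let best := PySem.List.maxD (x :: xs) c x
    best :: pvSelAll c ((x :: xs).erase best)
termination_by r => r.length
decreasing_by
  simp [List.length_erase_of_mem (pvMaxD_cons_mem c x xs)]

theorem pv_foldl_append (f : List String → String → List String)
    (hf : ∀ acc s, f acc s = acc ++ (pvKey s).toList) :
    ∀ (sentences : List String) (acc : List String),
      sentences.foldl f acc = acc ++ sentences.filterMap pvKey := by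
  intro sentences
  induction sentences with
  | nil => intro acc; simp
  | cons s t ih =>
      intro acc
      rw [List.foldl_cons, hf, ih, List.filterMap_cons]
      cases pvKey s <;> simp

theorem pvA_step (acc : List String) (s : String) :
    (let words := PySem.Str.split₀ s
     if 2 ≤ words.length then
       acc ++ [PySem.Str.lower (words[0]! ++ " " ++ words[1]!)]
     else if words ≠ [] then
       acc ++ [PySem.Str.lower words[0]!]
     else acc) = acc ++ (pvKey s).toList := by
  simp only [pvKey]
  split_ifs <;> simp

theorem pv_foldl_dict (f : PySem.Dict String Int → String → PySem.Dict String Int)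
    (hf : ∀ d s, f d s = match pvKey s with
      | none => d
      | some k => d.insert k (d.getD k 0 + 1)) :
    ∀ (sentences : List String) (d : PySem.Dict String Int),
      sentences.foldl f d
        = (sentences.filterMap pvKey).foldl (fun d k => d.insert k (d.getD k 0 + 1)) d := by
  intro sentences
  induction sentences with
  | nil => intro d; rfl
  | cons s t ih =>
      intro d
      rw [List.foldl_cons, hf, List.filterMap_cons]
      cases pvKey s <;> simp [ih]

theorem pvB_step (d : PySem.Dict String Int) (s : String) :
    (let words := PySem.Str.split₀ s
     if words ≠ [] then
       let key := PySem.Str.lower (PySem.Str.join " " (PySem.List.slice words none (some 2)))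
       d.insert key (d.getD key 0 + 1)
     else d)
    = (match pvKey s with
       | none => d
       | some k => d.insert k (d.getD k 0 + 1)) := by
  simp only [pvKey]
  rw [PySem.List.slice_to _ (by omega)]
  match h : PySem.Str.split₀ s with
  | [] => simp
  | [w] =>
      have hj : PySem.Str.join " " [w] = w := by
        apply String.toList_injective
        simp [PySem.Str.join, PySem.Chars.join, List.intercalate]
      simp [hj]
  | w0 :: w1 :: rest =>
      have hj : PySem.Str.join " " [w0, w1] = w0 ++ " " ++ w1 := by
        apply String.toList_injective
        simp [PySem.Str.join, PySem.Chars.join, List.intercalate]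
      simp [hj]

-- insertBy on pairs (k, c k) compared by the second component is insertBy on keys by c
theorem pvInsertBy_map (c : String → Int) (x : String) :
    ∀ (t : List String),
      PySem.List.insertBy (fun a b : String × Int => decide (b.2 < a.2)) (x, c x)
          (t.map (fun k => (k, c k)))
        = (PySem.List.insertBy (fun a b => decide (c b < c a)) x t).map (fun k => (k, c k)) := by
  intro t
  induction t with
  | nil => simp [PySem.List.insertBy]
  | cons y t ih =>
      by_cases h : c y < c x <;>
        simp [PySem.List.insertBy, h, ih]

-- sorting the items (k, c k) by count is sorting the keys by c, mapped
theorem pvSorted_map (c : String → Int) (r : List String) :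
    PySem.List.sorted (r.map (fun k => (k, c k))) (fun kv => kv.2) true
      = (PySem.List.sorted r c true).map (fun k => (k, c k)) := by
  rw [PySem.List.sorted_rev_eq_foldl_insertBy, PySem.List.sorted_rev_eq_foldl_insertBy]
  suffices h : ∀ (r t : List String),
      (r.map (fun k => (k, c k))).foldl
          (fun acc kv => PySem.List.insertBy (fun a b : String × Int => decide (b.2 < a.2)) kv acc)
          (t.map (fun k => (k, c k)))
        = (r.foldl (fun acc x => PySem.List.insertBy (fun a b => decide (c b < c a)) x acc) t).map
            (fun k => (k, c k)) by
    simpa using h r []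
  intro r
  induction r with
  | nil => intro t; simp
  | cons x r ih =>
      intro t
      simp only [List.map_cons, List.foldl_cons, pvInsertBy_map, ih]

-- appending one element sorts by inserting it
theorem pvSorted_snoc (c : String → Int) (ys : List String) (x : String) :
    PySem.List.sorted (ys ++ [x]) c true
      = PySem.List.insertBy (fun a b => decide (c b < c a)) x (PySem.List.sorted ys c true) := by
  rw [PySem.List.sorted_rev_eq_foldl_insertBy, PySem.List.sorted_rev_eq_foldl_insertBy,
    List.foldl_append]
  rfl

-- stable descending sort = first-max extraction
theorem pvExtract (c : String → Int) :
    ∀ (r : List String), r.Nodup → ∀ m, PySem.List.max? r c = some m →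
      PySem.List.sorted r c true = m :: PySem.List.sorted (r.erase m) c true := by
  intro r
  induction r using List.reverseRecOn with
  | nil => intro _ m hm; simp [PySem.List.max?] at hm
  | append_singleton ys x ih =>
      intro hnd m hm
      rw [pvSorted_snoc]
      cases ys with
      | nil =>
          simp only [List.nil_append] at hm hnd ⊢
          have hx : x = m := by simpa [PySem.List.max?] using hm
          subst hx
          simp [PySem.List.sorted, PySem.List.insertBy]
      | cons y ys' =>
          obtain ⟨m', hm'⟩ := pvMax?_cons_isSome c y ys'
          have hmx : PySem.List.max? (y :: ys' ++ [x]) c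
              = if c m' < c x then some x else some m' := by
            simp only [PySem.List.max?] at hm' ⊢
            rw [List.foldl_append, hm']
            simp
          have hndy : (y :: ys').Nodup := (List.nodup_append.mp hnd).1
          have ihy := ih hndy m' hm'
          by_cases hlt : c m' < c x
          · rw [hmx] at hm
            simp only [hlt, if_true, Option.some.injEq] at hm
            rw [← hm]
            have hx : x ∉ y :: ys' := fun h =>
              ((List.nodup_append.mp hnd).2.2 x h x (List.mem_singleton_self x)) rfl
            rw [List.erase_append_right _ hx, List.erase_cons_head, List.append_nil, ihy]
            simp [PySem.List.insertBy, hlt]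
          · rw [hmx] at hm
            simp only [hlt, if_false, Option.some.injEq] at hm
            rw [← hm]
            have hmem' : m' ∈ y :: ys' := PySem.List.max?_mem hm'
            rw [List.erase_append_left _ hmem', pvSorted_snoc, ihy]
            simp [PySem.List.insertBy, hlt]

-- sorted = pvSelAll on nodup lists
theorem pvSortedEqSelAll (c : String → Int) :
    ∀ (n : Nat) (r : List String), r.length ≤ n → r.Nodup →
      PySem.List.sorted r c true = pvSelAll c r := by
  intro n
  induction n with
  | zero =>
      intro r hr _
      have : r = [] := List.eq_nil_of_length_eq_zero (Nat.le_zero.mp hr)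
      subst this; simp [PySem.List.sorted, pvSelAll]
  | succ n ih =>
      intro r hr hnd
      match r with
      | [] => simp [PySem.List.sorted, pvSelAll]
      | x :: xs =>
          obtain ⟨m, hm⟩ := pvMax?_cons_isSome c x xs
          rw [pvExtract _ _ hnd m hm, pvSelAll]
          have hbest : PySem.List.maxD (x :: xs) c x = m := by
            rw [PySem.List.maxD, hm]; rfl
          rw [hbest]
          congr 1
          have hmem : m ∈ x :: xs := PySem.List.max?_mem hm
          have hlen : ((x :: xs).erase m).length ≤ n := by
            rw [List.length_erase_of_mem hmem]; simpa using Nat.le_of_succ_le_succ hr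
          exact ih _ hlen (hnd.erase m)

-- the budgeted loop is a take of the full selection
theorem pvPickLoop_take (c : String → Int) :
    ∀ (n : Nat) (r : List String), r.length ≤ n → ∀ (b : Int),
      pvPickLoop c b r = (pvSelAll c r).take b.toNat := by
  intro n
  induction n with
  | zero =>
      intro r hr b
      have : r = [] := List.eq_nil_of_length_eq_zero (Nat.le_zero.mp hr)
      subst this; simp [pvPickLoop, pvSelAll]
  | succ n ih =>
      intro r hr b
      match r with
      | [] => simp [pvPickLoop, pvSelAll]
      | x :: xs =>
          rw [pvPickLoop, pvSelAll]
          by_cases hb : b ≤ 0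
          · have : b.toNat = 0 := by omega
            simp [hb, this]
          · have hbt : b.toNat = (b - 1).toNat + 1 := by omega
            have hmem := pvMaxD_cons_mem c x xs
            have hlen : ((x :: xs).erase (PySem.List.maxD (x :: xs) c x)).length ≤ n := by
              rw [List.length_erase_of_mem hmem]; simpa using Nat.le_of_succ_le_succ hr
            simp only [hb, if_false, hbt, List.take_succ_cons]
            exact congrArg _ (ih _ hlen (b - 1))

-- ===== VERDICT (by name: the statement is the Claim_ definition above) =====
theorem get_common_starters_spec : Claim_equal_get_common_starters := by
  intro sentences top_n _
  unfold Spec_get_common_starters get_common_starters get_common_starters_alt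
  rw [pv_foldl_append _ pvA_step, pv_foldl_dict _ pvB_step, List.nil_append,
    PySem.Dict.foldl_insert_getD_add_one_eq_counter]
  set K := sentences.filterMap pvKey with hK
  set c : String → Int := fun k => ((K.count k : Int)) with hc
  dsimp only
  have hgetD : (fun k => (PySem.Dict.counter K).getD k 0) = c := by
    funext k; rw [PySem.Dict.getD_counter, hc]
  rw [PySem.Dict.items_counter, PySem.Dict.keys_counter, hgetD,
    pvSorted_map, pvSortedEqSelAll c (PySem.Set.ofList K).length _ le_rfl (PySem.Set.nodup_ofList K),
    pvPickLoop_take c (PySem.Set.ofList K).length _ le_rfl]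
  by_cases h : top_n < 0
  · have : top_n.toNat = 0 := by omega
    simp [h, this]
  · simp [h, List.map_take, List.map_map, Function.comp_def]
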